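-- pv_equiv track=rewrite | github.com/Bad-Website-Club/website-v2 | lesson-generator.py | build_group_titles
-- ===== SOURCE A (Python) =====
-- def build_group_titles(grouped_rows):
--     title_counts = {}
--     for grouped_row in grouped_rows:
--         base_title = grouped_row["base_title"]
--         title_counts[base_title] = title_counts.get(base_title, 0) + 1
--
--     title_indexes = {}
--     lesson_titles = []
--     for grouped_row in grouped_rows:
--         base_title = grouped_row["base_title"]
--         if title_counts[base_title] == 1:
--             lesson_titles.append(base_title)
--             continue
--
--         title_indexes[base_title] = title_indexes.get(base_title, 0) + 1
--         lesson_titles.append(f'{base_title} Part {title_indexes[base_title]}')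
--
--     return lesson_titles
-- ===== SOURCE B (Python) =====
-- def build_group_titles(grouped_rows):
--     positions = {}
--     for i, grouped_row in enumerate(grouped_rows):
--         positions.setdefault(grouped_row["base_title"], []).append(i)
--
--     lesson_titles = [None] * len(grouped_rows)
--     for base_title, idxs in positions.items():
--         if len(idxs) == 1:
--             lesson_titles[idxs[0]] = base_title
--         else:
--             for part, i in enumerate(idxs, 1):
--                 lesson_titles[i] = f'{base_title} Part {part}'
--     return lesson_titles
-- ===== Notes on version B (the rewrite author's own statement) =====
-- stated objective: alternative
-- what changed: B builds one dict mapping each base_title to the list of row positions where it occurs, then scatters the labels into a preallocated list by position (enumerating each title's position list for the Part numbers), replacing A's two running counter dicts and ordered appends.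
import Mathlib
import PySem

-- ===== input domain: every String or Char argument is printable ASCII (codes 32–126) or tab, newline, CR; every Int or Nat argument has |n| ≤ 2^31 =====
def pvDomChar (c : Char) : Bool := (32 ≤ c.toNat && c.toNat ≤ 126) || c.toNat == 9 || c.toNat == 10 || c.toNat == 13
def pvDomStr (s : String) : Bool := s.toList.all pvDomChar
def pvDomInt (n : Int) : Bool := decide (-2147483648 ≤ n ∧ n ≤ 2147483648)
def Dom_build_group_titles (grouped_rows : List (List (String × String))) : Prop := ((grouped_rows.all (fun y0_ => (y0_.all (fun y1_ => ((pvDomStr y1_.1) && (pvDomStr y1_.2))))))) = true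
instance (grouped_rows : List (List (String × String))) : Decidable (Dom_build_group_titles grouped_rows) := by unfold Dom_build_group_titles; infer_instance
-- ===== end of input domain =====

-- B groups row positions by title in one dict pass and then scatters the labels by
-- position instead of A's two counting dicts with an ordered append (objective: alternative).

-- shared transliteration of the dict access grouped_row["base_title"]; the .getD "" arm is
-- unreachable under Pre_ (every row carries the key; Python raises KeyError otherwise)
def pvTitle (row : List (String × String)) : String :=
  ((PySem.Dict.mk row).get? "base_title").getD ""

-- ===== PORT A =====
def build_group_titles (grouped_rows : List (List (String × String))) : List String :=
  let title_counts : PySem.Dict String Int :=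
    grouped_rows.foldl (fun d r => d.insert (pvTitle r) (d.getD (pvTitle r) 0 + 1)) PySem.Dict.empty
  (grouped_rows.foldl
    (fun (st : PySem.Dict String Int × List String) r =>
      let b := pvTitle r
      if title_counts.getD b 0 == 1 then (st.1, st.2 ++ [b])
      else
        let idx := st.1.insert b (st.1.getD b 0 + 1)
        (idx, st.2 ++ [b ++ " Part " ++ PySem.Int.toStr (idx.getD b 0)]))
    (PySem.Dict.empty, [])).2

-- ===== PORT B =====
-- lesson_titles = [None]*n with every slot written exactly once is ported as a
-- List String initialised with "" placeholders; lesson_titles[i] = v is PySem.List.pySetD.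
def build_group_titles_alt (grouped_rows : List (List (String × String))) : List String :=
  let positions : PySem.Dict String (List Int) :=
    (PySem.List.enumerate grouped_rows).foldl
      (fun d ir => d.modify (pvTitle ir.2) [] (fun l => l ++ [ir.1])) PySem.Dict.empty
  positions.items.foldl
    (fun lesson_titles ti =>
      if ti.2.length == 1 then
        PySem.List.pySetD lesson_titles (PySem.List.pyGetD ti.2 0 0) ti.1
      else
        (PySem.List.enumerate ti.2 1).foldl
          (fun lt pi => PySem.List.pySetD lt pi.2 (ti.1 ++ " Part " ++ PySem.Int.toStr pi.1))
          lesson_titles)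
    (List.replicate grouped_rows.length "")

-- ===== PRECONDITION & SPEC =====
-- Pre_ excludes exactly the rows without a "base_title" key, on which Python A raises KeyError.
def Pre_build_group_titles (grouped_rows : List (List (String × String))) : Prop :=
  (grouped_rows.all (fun r => (PySem.Dict.mk r).contains "base_title")) = true
instance (grouped_rows : List (List (String × String))) : Decidable (Pre_build_group_titles grouped_rows) := by unfold Pre_build_group_titles; infer_instance
def pvWitness_build_group_titles : (List (List (String × String))) :=
  [[("base_title", "x")], [("base_title", "y")], [("base_title", "x")]]
def Spec_build_group_titles (grouped_rows : List (List (String × String))) (out : List String) : Prop := out = build_group_titles_alt grouped_rows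
instance (grouped_rows : List (List (String × String))) (out : List String) : Decidable (Spec_build_group_titles grouped_rows out) := by unfold Spec_build_group_titles; infer_instance

-- ===== CLAIM (what is proved, stated in full; the proofs are below) =====
def Claim_equal_build_group_titles : Prop := ∀ (grouped_rows : List (List (String × String))), Dom_build_group_titles grouped_rows → Pre_build_group_titles grouped_rows → Spec_build_group_titles grouped_rows (build_group_titles grouped_rows)

-- ===== LEMMAS AND PROOFS =====

-- the common value both programs compute: walk `rest` with the already-seen prefix `pre`,
-- numbering duplicates (w.r.t. the full list `full`) by pre-count + 1
def pvSpecGo (full : List String) : List String → List String → List String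
  | _pre, [] => []
  | pre, t :: rest =>
      (if full.count t == 1 then t
       else t ++ " Part " ++ PySem.Int.toStr ((pre.count t : Int) + 1)) :: pvSpecGo full (pre ++ [t]) rest

-- the same value as a function of the position: bare title if unique, else
-- title Part (count of the title in the prefix up to and including position i)
def fPos (titles : List String) (i : Nat) : String :=
  let t := titles.getD i ""
  if titles.count t == 1 then t
  else t ++ " Part " ++ PySem.Int.toStr (((titles.take (i+1)).count t : Nat) : Int)

-- B-side machinery: posA xs k t = ascending positions (offset k) of title t in xs
def posA : List String → Nat → String → List Nat
  | [], _, _ => []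
  | x :: xs, k, t => (if x == t then [k] else []) ++ posA xs (k+1) t

theorem posA_eq_filter : ∀ (xs : List String) (k : Nat) (t : String),
    posA xs k t = ((xs.zipIdx k).filter (fun p => p.1 == t)).map (·.2) := by
  intro xs
  induction xs with
  | nil => intro k t; simp [posA]
  | cons x xs ih =>
    intro k t
    rw [List.zipIdx_cons]
    by_cases hx : x = t
    · simp [posA, hx, ih (k+1) t]
    · simp [posA, hx, ih (k+1) t]

theorem posA_ge : ∀ (xs : List String) (k : Nat) (t : String) (j : Nat), j ∈ posA xs k t → k ≤ j := by
  intro xs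
  induction xs with
  | nil => intro k t j h; simp [posA] at h
  | cons x xs ih =>
    intro k t j h
    by_cases hx : x = t
    · simp only [posA, hx, beq_self_eq_true, if_true, List.singleton_append, List.mem_cons] at h
      rcases h with rfl | h2
      · omega
      · have := ih (k+1) t j h2; omega
    · simp only [posA, beq_iff_eq, hx, if_false, List.nil_append] at h
      have := ih (k+1) t j h; omega

theorem posA_length : ∀ (xs : List String) (k : Nat) (t : String), (posA xs k t).length = xs.count t := by
  intro xs
  induction xs with
  | nil => intro k t; simp [posA]
  | cons x xs ih =>
    intro k t
    by_cases hx : x = t <;> simp [posA, hx, ih (k + 1) t]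

theorem posA_pairwise : ∀ (xs : List String) (k : Nat) (t : String), (posA xs k t).Pairwise (· < ·) := by
  intro xs
  induction xs with
  | nil => intro k t; simp [posA]
  | cons x xs ih =>
    intro k t
    by_cases hx : x = t
    · simp only [posA, hx, beq_self_eq_true, if_true, List.singleton_append]
      refine List.pairwise_cons.mpr ⟨?_, ih (k+1) t⟩
      intro b hb
      have := posA_ge xs (k+1) t b hb; omega
    · simpa only [posA, beq_iff_eq, hx, if_false, List.nil_append] using ih (k+1) t

theorem posA_mem_spec : ∀ (xs : List String) (k : Nat) (t : String) (j : Nat), j ∈ posA xs k t →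
    ∃ m, j = k + m ∧ xs[m]? = some t := by
  intro xs
  induction xs with
  | nil => intro k t j h; simp [posA] at h
  | cons x xs ih =>
    intro k t j h
    by_cases hx : x = t
    · simp only [posA, hx, beq_self_eq_true, if_true, List.singleton_append, List.mem_cons] at h
      rcases h with rfl | h2
      · exact ⟨0, by omega, by simp [hx]⟩
      · obtain ⟨m, hm, hg⟩ := ih (k+1) t j h2
        exact ⟨m+1, by omega, by simpa using hg⟩
    · simp only [posA, beq_iff_eq, hx, if_false, List.nil_append] at h
      obtain ⟨m, hm, hg⟩ := ih (k+1) t j h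
      exact ⟨m+1, by omega, by simpa using hg⟩

theorem posA_complete : ∀ (xs : List String) (k : Nat) (t : String) (j : Nat), xs[j]? = some t →
    (k + j) ∈ posA xs k t := by
  intro xs
  induction xs with
  | nil => intro k t j h; simp at h
  | cons x xs ih =>
    intro k t j h
    cases j with
    | zero =>
      simp only [List.getElem?_cons_zero, Option.some_inj] at h
      subst h
      simp [posA]
    | succ m =>
      simp only [List.getElem?_cons_succ] at h
      refine List.mem_append.mpr (Or.inr ?_)
      have heq : k + (m + 1) = (k+1) + m := by omega
      rw [heq]
      exact ih (k+1) t m h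

theorem posA_rank : ∀ (xs : List String) (k : Nat) (t : String) (r : Nat), r < (posA xs k t).length →
    ∃ m, (posA xs k t)[r]? = some (k + m) ∧ xs[m]? = some t ∧ (xs.take (m+1)).count t = r + 1 := by
  intro xs
  induction xs with
  | nil => intro k t r h; simp [posA] at h
  | cons x xs ih =>
    intro k t r h
    by_cases hx : x = t
    · have hp : posA (x :: xs) k t = k :: posA xs (k+1) t := by
        simp [posA, hx]
      rw [hp] at h ⊢
      cases r with
      | zero =>
        exact ⟨0, by simp, by simp [hx], by simp [hx]⟩
      | succ r' =>
        have hlen : r' < (posA xs (k+1) t).length := by simpa using h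
        obtain ⟨m, hel, hg, hc⟩ := ih (k+1) t r' hlen
        refine ⟨m+1, ?_, by simpa using hg, ?_⟩
        · simpa [Nat.add_assoc, Nat.add_comm, Nat.add_left_comm] using hel
        · rw [List.take_succ_cons, List.count_cons]
          simp only [hx, beq_self_eq_true, if_true]
          omega
    · have hp : posA (x :: xs) k t = posA xs (k+1) t := by simp [posA, hx]
      rw [hp] at h ⊢
      obtain ⟨m, hel, hg, hc⟩ := ih (k+1) t r h
      refine ⟨m+1, by rw [hel]; congr 1; omega, by simpa using hg, ?_⟩
      rw [List.take_succ_cons, List.count_cons]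
      simp only [beq_iff_eq, hx, if_false]
      omega

theorem enum_eq_zipIdx {α : Type} : ∀ (xs : List α) (s : Int) (n : Nat),
    PySem.List.enumerate xs s = (xs.zipIdx n).map (fun p => (s + (p.2 : Int) - (n : Int), p.1)) := by
  intro xs
  induction xs with
  | nil => intro s n; simp [PySem.List.enumerate_nil]
  | cons x xs ih =>
    intro s n
    rw [PySem.List.enumerate_cons, List.zipIdx_cons, List.map_cons]
    refine congrArg₂ List.cons (by simp) ?_
    rw [ih (s+1) (n+1)]
    refine List.map_congr_left ?_
    intro p _
    refine congrArg₂ Prod.mk ?_ rfl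
    push_cast
    ring

theorem henum {α : Type} (xs : List α) :
    PySem.List.enumerate xs = xs.zipIdx.map (fun p => ((p.2 : Int), p.1)) := by
  rw [enum_eq_zipIdx xs 0 0]
  exact List.map_congr_left (fun p _ => by simp)

def writeN (titles : List String) (t : String) : List (Nat × String) :=
  (posA titles 0 t).zipIdx.map (fun p =>
    (p.1, if (posA titles 0 t).length == 1 then t
          else t ++ " Part " ++ PySem.Int.toStr ((p.2 : Int) + 1)))

theorem foldl_set_length : ∀ (ws : List (Nat × String)) (slots : List String),
    (ws.foldl (fun s p => s.set p.1 p.2) slots).length = slots.length := by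
  intro ws
  induction ws with
  | nil => intro slots; rfl
  | cons w ws ih => intro slots; rw [List.foldl_cons, ih]; simp

theorem foldl_set_not_mem : ∀ (ws : List (Nat × String)) (slots : List String) (i : Nat),
    (∀ p ∈ ws, p.1 ≠ i) → (ws.foldl (fun s p => s.set p.1 p.2) slots)[i]? = slots[i]? := by
  intro ws
  induction ws with
  | nil => intro slots i _; rfl
  | cons w ws ih =>
    intro slots i h
    rw [List.foldl_cons, ih _ i (fun p hp => h p (List.mem_cons_of_mem _ hp)),
      List.getElem?_set_ne (h w List.mem_cons_self)]

theorem foldl_set_mem : ∀ (ws : List (Nat × String)) (slots : List String) (i : Nat) (v : String),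
    (ws.map Prod.fst).Nodup → (i, v) ∈ ws → i < slots.length →
    (ws.foldl (fun s p => s.set p.1 p.2) slots)[i]? = some v := by
  intro ws
  induction ws with
  | nil => intro slots i v _ hm; simp at hm
  | cons w ws ih =>
    intro slots i v hnd hm hlt
    rw [List.map_cons, List.nodup_cons] at hnd
    rw [List.foldl_cons]
    rcases List.mem_cons.mp hm with rfl | hm2
    · rw [foldl_set_not_mem ws _ i (fun p hp hpi => hnd.1 (hpi ▸ (List.mem_map_of_mem hp : p.1 ∈ ws.map Prod.fst)))]
      exact List.getElem?_set_self hlt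
    · exact ih _ i v hnd.2 hm2 (by simpa using hlt)

theorem nodup_flat_pos (titles : List String) : ∀ (ks : List String), ks.Nodup →
    (ks.flatMap (fun t => posA titles 0 t)).Nodup := by
  intro ks
  induction ks with
  | nil => intro _; simp
  | cons t ks ih =>
    intro hnd
    rw [List.nodup_cons] at hnd
    rw [List.flatMap_cons, List.nodup_append]
    refine ⟨(posA_pairwise titles 0 t).nodup, ih hnd.2, ?_⟩
    intro a ha b hb hab
    subst hab
    obtain ⟨t', ht', hb'⟩ := List.mem_flatMap.mp hb
    obtain ⟨m, rfl, hg⟩ := posA_mem_spec titles 0 t a ha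
    obtain ⟨m', hm', hg'⟩ := posA_mem_spec titles 0 t' _ hb'
    have : m = m' := by omega
    subst this
    rw [hg] at hg'
    have : t = t' := by injection hg'
    exact hnd.1 (this ▸ ht')

theorem specgo_eq_map (full : List String) : ∀ (rest pre : List String), full = pre ++ rest →
    pvSpecGo full pre rest = (List.range rest.length).map (fun j => fPos full (pre.length + j)) := by
  intro rest
  induction rest with
  | nil => intro pre _; simp [pvSpecGo]
  | cons t rest ih =>
    intro pre h
    rw [pvSpecGo, List.length_cons, List.range_succ_eq_map, List.map_cons, List.map_map]
    refine congrArg₂ List.cons ?_ ?_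
    · have hget : full.getD pre.length "" = t := by
        rw [h, List.getD_eq_getElem?_getD, List.getElem?_append_right (le_refl _)]
        simp
      have htake : full.take (pre.length + 1) = pre ++ [t] := by
        rw [h]; simp [List.take_append]
      rw [fPos]
      simp only [Nat.add_zero, hget, htake]
      by_cases hc : (full.count t == 1) = true
      · simp [hc]
      · simp only [hc, Bool.false_eq_true, if_false]
        congr 1
        rw [List.count_append]
        push_cast
        simp
    · have := ih (pre ++ [t]) (by simpa using h)
      rw [this]
      refine List.map_congr_left ?_
      intro j _
      simp only [Function.comp_apply, List.length_append, List.length_singleton]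
      congr 1
      omega

theorem b_eq_map (rows : List (List (String × String))) :
    build_group_titles_alt rows
      = (List.range (rows.map pvTitle).length).map (fPos (rows.map pvTitle)) := by
  set titles := rows.map pvTitle with htitles
  set d := (PySem.List.enumerate rows).foldl
      (fun d ir => d.modify (pvTitle ir.2) [] (fun l => l ++ [ir.1])) PySem.Dict.empty with hd
  have hB : build_group_titles_alt rows = d.items.foldl
      (fun lesson_titles ti =>
        if ti.2.length == 1 then
          PySem.List.pySetD lesson_titles (PySem.List.pyGetD ti.2 0 0) ti.1
        else
          (PySem.List.enumerate ti.2 1).foldl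
            (fun lt pi => PySem.List.pySetD lt pi.2 (ti.1 ++ " Part " ++ PySem.Int.toStr pi.1))
            lesson_titles)
      (List.replicate rows.length "") := rfl
  rw [hB]
  have hkeysnd : d.keys.Nodup := by
    rw [hd]
    exact PySem.Dict.nodup_keys_foldl_modify_key (PySem.List.enumerate rows)
      (fun ir => pvTitle ir.2) [] (fun _ ir l => l ++ [ir.1]) PySem.Dict.empty
      (by simp)
  have hkeys : d.keys = PySem.Set.ofList titles := by
    rw [hd, PySem.Dict.keys_foldl_modify_key (PySem.List.enumerate rows)
      (fun ir => pvTitle ir.2) [] (fun _ ir l => l ++ [ir.1]) PySem.Dict.empty]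
    rw [henum, List.map_map]
    have h1 : (rows.zipIdx.map ((fun ir : Int × List (String × String) => pvTitle ir.2) ∘ (fun p => ((p.2 : Int), p.1)))) = titles := by
      rw [show ((fun ir : Int × List (String × String) => pvTitle ir.2) ∘ (fun p : List (String × String) × Nat => ((p.2 : Int), p.1))) = pvTitle ∘ Prod.fst from rfl]
      rw [← List.map_map, List.zipIdx_map_fst, htitles]
    rw [h1]
    simp [PySem.Set.update, PySem.Set.ofList]
  have hval : ∀ t, d.getD t [] = (posA titles 0 t).map (fun (j : Nat) => (j : Int)) := by
    intro t
    rw [hd, henum, List.foldl_map]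
    rw [← List.foldl_map (f := fun (p : List (String × String) × Nat) => (pvTitle p.1, (p.2 : Int)))
      (g := fun (dd : PySem.Dict String (List Int)) (q : String × Int) => dd.modify q.1 [] (fun l => l ++ [q.2]))]
    rw [PySem.Dict.getD_foldl_modify_append]
    rw [PySem.Dict.getD_empty, List.nil_append]
    rw [posA_eq_filter titles 0 t, htitles, List.zipIdx_map]
    simp only [List.filter_map, List.map_map]
    rfl
  have hitems : d.items = d.keys.map (fun t => (t, d.getD t [])) :=
    PySem.Dict.items_eq_map_keys d hkeysnd []
  rw [hitems, List.foldl_map]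
  simp only [hval]
  have hstep : ∀ (s : List String) (t : String),
      (if ((posA titles 0 t).map (fun (j : Nat) => (j : Int))).length == 1 then
        PySem.List.pySetD s (PySem.List.pyGetD ((posA titles 0 t).map (fun (j : Nat) => (j : Int))) 0 0) t
      else
        (PySem.List.enumerate ((posA titles 0 t).map (fun (j : Nat) => (j : Int))) 1).foldl
          (fun lt pi => PySem.List.pySetD lt pi.2 (t ++ " Part " ++ PySem.Int.toStr pi.1)) s)
      = (writeN titles t).foldl (fun s p => s.set p.1 p.2) s := by
    intro s t
    by_cases h1 : (posA titles 0 t).length = 1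
    · obtain ⟨j, hj⟩ := List.length_eq_one_iff.mp h1
      rw [hj]
      simp [writeN, hj, PySem.List.pyGetD_zero_cons, PySem.List.pySetD_natCast]
    · have h1' : ((posA titles 0 t).length == 1) = false := by simpa using h1
      simp only [List.length_map, h1', Bool.false_eq_true, if_false]
      rw [enum_eq_zipIdx ((posA titles 0 t).map (fun (j : Nat) => (j : Int))) 1 0]
      rw [List.zipIdx_map, List.map_map, List.foldl_map]
      rw [writeN, List.foldl_map]
      congr 1
      funext lt p
      obtain ⟨a, b⟩ := p
      simp only [h1', Bool.false_eq_true, if_false, Function.comp_apply, Prod.map_apply, id_eq]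
      rw [PySem.List.pySetD_natCast]
      have harg : (1 : Int) + (b : Int) - ((0 : Nat) : Int) = (b : Int) + 1 := by push_cast; ring
      rw [harg]
  simp only [hstep]
  rw [← List.foldl_flatMap]
  have hnodup : ((d.keys.flatMap (writeN titles)).map Prod.fst).Nodup := by
    rw [List.map_flatMap]
    have hw : ∀ t, (writeN titles t).map Prod.fst = posA titles 0 t := by
      intro t
      rw [writeN, List.map_map]
      exact List.zipIdx_map_fst 0 _
    simp only [hw]
    exact nodup_flat_pos titles d.keys hkeysnd
  apply List.ext_getElem?
  intro i
  by_cases hi : i < titles.length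
  · have hti : titles[i]? = some (titles[i]'hi) := List.getElem?_eq_getElem hi
    have hpos : i ∈ posA titles 0 (titles[i]'hi) := by
      have := posA_complete titles 0 _ i hti
      simpa using this
    obtain ⟨r, hr, hre⟩ := List.mem_iff_getElem.mp hpos
    obtain ⟨m, hel, hgm, hcnt⟩ := posA_rank titles 0 _ r hr
    have hm : m = i := by
      rw [List.getElem?_eq_getElem hr, hre] at hel
      have := Option.some_inj.mp hel
      omega
    subst hm
    have hzip : (m, r) ∈ (posA titles 0 (titles[m]'hi)).zipIdx :=
      List.mk_mem_zipIdx_iff_getElem?.mpr (by rw [List.getElem?_eq_getElem hr, hre])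
    have hwmem : (m, fPos titles m) ∈ writeN titles (titles[m]'hi) := by
      rw [writeN]
      refine List.mem_map.mpr ⟨(m, r), hzip, ?_⟩
      have hgd : titles.getD m "" = titles[m]'hi := by
        rw [List.getD_eq_getElem?_getD, hti]; rfl
      rw [fPos]
      simp only [hgd, posA_length titles 0 (titles[m]'hi)]
      by_cases hc : (titles.count (titles[m]'hi) == 1) = true
      · simp [hc]
      · have hc' : (titles.count (titles[m]'hi) == 1) = false := by simpa using hc
        simp only [hc', Bool.false_eq_true, if_false]
        refine congrArg₂ Prod.mk rfl ?_
        rw [hcnt]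
        norm_num
    have hflat : (m, fPos titles m) ∈ d.keys.flatMap (writeN titles) :=
      List.mem_flatMap.mpr ⟨titles[m]'hi,
        by rw [hkeys]; exact (PySem.Set.mem_ofList _ _).mpr (List.getElem_mem hi), hwmem⟩
    rw [foldl_set_mem _ _ m _ hnodup hflat
      (by rw [List.length_replicate]; rw [htitles, List.length_map] at hi; exact hi)]
    rw [List.getElem?_map, List.getElem?_range hi]
    rfl
  · have hlen : ((d.keys.flatMap (writeN titles)).foldl (fun s p => s.set p.1 p.2)
        (List.replicate rows.length "")).length = titles.length := by
      rw [foldl_set_length, List.length_replicate, htitles, List.length_map]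
    have h1 : ((d.keys.flatMap (writeN titles)).foldl (fun s p => s.set p.1 p.2)
        (List.replicate rows.length "")).length ≤ i := by rw [hlen]; omega
    rw [List.getElem?_eq_none h1, List.getElem?_eq_none (by simp; omega)]

theorem a_eq_specGo (tc : PySem.Dict String Int) (full : List String)
    (htc : ∀ t, tc.getD t 0 = (full.count t : Int))
    (rest : List (List (String × String))) (pre : List String) (idx : PySem.Dict String Int)
    (hidx : ∀ t, full.count t ≠ 1 → idx.getD t 0 = (pre.count t : Int)) (acc : List String) :
    (rest.foldl
      (fun (st : PySem.Dict String Int × List String) r =>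
        let b := pvTitle r
        if tc.getD b 0 == 1 then (st.1, st.2 ++ [b])
        else
          let idx := st.1.insert b (st.1.getD b 0 + 1)
          (idx, st.2 ++ [b ++ " Part " ++ PySem.Int.toStr (idx.getD b 0)]))
      (idx, acc)).2 = acc ++ pvSpecGo full pre (rest.map pvTitle) := by
  induction rest generalizing pre idx acc with
  | nil => simp [pvSpecGo]
  | cons r rest ih =>
    simp only [List.foldl_cons, List.map_cons, pvSpecGo]
    by_cases hone : full.count (pvTitle r) = 1
    · have ht : (tc.getD (pvTitle r) 0 == 1) = true := by
        rw [htc (pvTitle r)]; simp [hone]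
      have hinv : ∀ t, full.count t ≠ 1 → idx.getD t 0 = ((pre ++ [pvTitle r]).count t : Int) := by
        intro t htne
        rcases eq_or_ne t (pvTitle r) with rfl | hne
        · exact absurd hone htne
        · rw [hidx t htne]; simp [List.count_append, Ne.symm hne]
      simp only [ht, if_true]
      rw [ih (pre ++ [pvTitle r]) idx hinv (acc ++ [pvTitle r])]
      simp [hone]
    · have ht : (tc.getD (pvTitle r) 0 == 1) = false := by
        rw [htc (pvTitle r)]; simp; omega
      have hb : (idx.insert (pvTitle r) (idx.getD (pvTitle r) 0 + 1)).getD (pvTitle r) 0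
          = (pre.count (pvTitle r) : Int) + 1 := by
        rw [PySem.Dict.getD_insert_self, hidx (pvTitle r) hone]
      have hinv : ∀ t, full.count t ≠ 1 →
          (idx.insert (pvTitle r) (idx.getD (pvTitle r) 0 + 1)).getD t 0
            = ((pre ++ [pvTitle r]).count t : Int) := by
        intro t htne
        rcases eq_or_ne t (pvTitle r) with rfl | hne
        · rw [hb]; simp [List.count_append]
        · rw [PySem.Dict.getD_insert_of_ne idx _ _ hne, hidx t htne]
          simp [List.count_append, Ne.symm hne]
      simp only [ht, Bool.false_eq_true, if_false]
      rw [ih (pre ++ [pvTitle r]) _ hinv]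
      rw [hb]
      simp [hone]

-- B-side: the ascending list of positions (offset k) at which title t occurs

-- ===== VERDICT (by name: the statement is the Claim_ definition above) =====
theorem build_group_titles_spec : Claim_equal_build_group_titles := by
  intro rows _ _
  unfold Spec_build_group_titles
  have htc : ∀ t,
      (rows.foldl (fun d r => d.insert (pvTitle r) (d.getD (pvTitle r) 0 + 1))
        PySem.Dict.empty).getD t 0 = ((rows.map pvTitle).count t : Int) := by
    intro t
    rw [← List.foldl_map (f := pvTitle)
      (g := fun (d : PySem.Dict String Int) x => d.insert x (d.getD x 0 + 1))]
    rw [PySem.Dict.getD_foldl_insert_add_one]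
    simp
  have ha : build_group_titles rows = pvSpecGo (rows.map pvTitle) [] (rows.map pvTitle) := by
    unfold build_group_titles
    rw [a_eq_specGo _ (rows.map pvTitle) htc rows [] PySem.Dict.empty
        (by intro t _; simp) []]
    rw [List.nil_append]
  rw [ha, b_eq_map rows, specgo_eq_map (rows.map pvTitle) (rows.map pvTitle) [] (by simp)]
  simp
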